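-- pv_equiv track=rewrite | github.com/XThomasBU/video-gen-evals | src_final/train_pl/utils.py | get_next_window_index
-- ===== SOURCE A (Python) =====
-- def get_next_window_index(vid_ids, window_ids, current_vid, current_window):
--     # Find all indices for the given video
--     vid_indices = [i for i, vid in enumerate(vid_ids) if vid == current_vid]
--     # Find window_ids for this video and sort
--     win_for_vid = [(window_ids[i], i) for i in vid_indices]
--     win_for_vid.sort()  # sort by window index
--
--     # Find the position of the current window
--     pos = [i for i, (w, _) in enumerate(win_for_vid) if w == current_window]
--     if not pos:
--         return None
--     pos = pos[0]
--     # If there is a next window, return its index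
--     if pos + 1 < len(win_for_vid):
--         return win_for_vid[pos + 1][1]  # index in original arrays
--     else:
--         return None  # No next window
-- ===== SOURCE B (Python) =====
-- def get_next_window_index(vid_ids, window_ids, current_vid, current_window):
--     # Single linear pass: track the two smallest original indices whose window
--     # equals current_window, and the lexicographically smallest (window, index)
--     # with window > current_window.
--     first = None   # smallest index i with vid == current_vid and window == current_window
--     second = None  # second smallest such index
--     best = None    # minimal (window, index) with window > current_window
--     for i, vid in enumerate(vid_ids):
--         if vid != current_vid:
--             continue
--         w = window_ids[i]
--         if w == current_window:
--             if first is None: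
--                 first = i
--             elif second is None:
--                 second = i
--         elif w > current_window:
--             if best is None or (w, i) < best:
--                 best = (w, i)
--     if first is None:
--         return None
--     if second is not None:
--         return second
--     return best[1] if best is not None else None
-- ===== Notes on version B (the rewrite author's own statement) =====
-- stated objective: faster
-- what changed: Replaces A's build-pairs, sort, then scan-for-position pipeline by a single linear pass that tracks the two smallest matching indices of current_window and the lexicographically least (window, index) pair above it.
import Mathlib
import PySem

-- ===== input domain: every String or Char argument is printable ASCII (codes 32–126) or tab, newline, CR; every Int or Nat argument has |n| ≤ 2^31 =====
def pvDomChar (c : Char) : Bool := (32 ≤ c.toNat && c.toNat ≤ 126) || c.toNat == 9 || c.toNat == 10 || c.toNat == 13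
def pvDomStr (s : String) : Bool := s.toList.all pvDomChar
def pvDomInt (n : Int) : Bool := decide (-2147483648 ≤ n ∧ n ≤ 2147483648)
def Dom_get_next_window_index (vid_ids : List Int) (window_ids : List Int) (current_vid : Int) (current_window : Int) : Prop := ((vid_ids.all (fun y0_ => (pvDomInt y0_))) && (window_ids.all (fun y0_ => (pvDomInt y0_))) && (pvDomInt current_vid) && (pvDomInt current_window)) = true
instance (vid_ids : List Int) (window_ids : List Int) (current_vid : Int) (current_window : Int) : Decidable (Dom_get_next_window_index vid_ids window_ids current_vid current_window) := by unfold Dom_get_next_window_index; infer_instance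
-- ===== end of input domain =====

-- B replaces A's sort-then-scan by a single linear pass tracking the two smallest matching
-- indices of current_window and the lexicographically least (window, index) above it.

-- ===== PORT A =====
def get_next_window_index (vid_ids : List Int) (window_ids : List Int) (current_vid : Int) (current_window : Int) : Option Int :=
  -- vid_indices = [i for i, vid in enumerate(vid_ids) if vid == current_vid]
  let vid_indices : List Int :=
    (PySem.List.enumerate vid_ids).filterMap (fun p => if p.2 = current_vid then some p.1 else none)
  -- win_for_vid = [(window_ids[i], i) for i in vid_indices]
  -- window_ids[i] is in range under Pre_ (Python raises IndexError outside), so the default of pyGetD is never used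
  let win_for_vid : List (Int × Int) :=
    vid_indices.map (fun i => (PySem.List.pyGetD window_ids i 0, i))
  -- win_for_vid.sort(): Python sorts the pairs lexicographically
  let sorted_w : List (Int × Int) := PySem.List.sorted2 win_for_vid (fun p => p.1) (fun p => p.2)
  -- pos = [i for i, (w, _) in enumerate(win_for_vid) if w == current_window]
  let pos_list : List Int :=
    (PySem.List.enumerate sorted_w).filterMap (fun q => if q.2.1 = current_window then some q.1 else none)
  match pos_list with
  | [] => none
  | pos :: _ =>
    if pos + 1 < (sorted_w.length : Int) then
      (PySem.List.pyGet? sorted_w (pos + 1)).map (fun p => p.2)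
    else none

-- ===== PORT B =====
-- the loop body of B: state (first, second, best)
def altStep (window_ids : List Int) (current_vid : Int) (current_window : Int)
    (st : Option Int × Option Int × Option (Int × Int)) (p : Int × Int) :
    Option Int × Option Int × Option (Int × Int) :=
  if p.2 ≠ current_vid then st
  else
    -- w = window_ids[i]; in range under Pre_ (Python raises IndexError outside)
    let w := PySem.List.pyGetD window_ids p.1 0
    if w = current_window then
      match st with
      | (none, second, best) => (some p.1, second, best)
      | (some f, none, best) => (some f, some p.1, best)
      | _ => st
    else if current_window < w then
      match st with
      | (first, second, none) => (first, second, some (w, p.1))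
      | (first, second, some b) =>
          if w < b.1 ∨ (w = b.1 ∧ p.1 < b.2) then (first, second, some (w, p.1)) else st
    else st

def get_next_window_index_alt (vid_ids : List Int) (window_ids : List Int) (current_vid : Int) (current_window : Int) : Option Int :=
  match (PySem.List.enumerate vid_ids).foldl (altStep window_ids current_vid current_window) (none, none, none) with
  | (none, _, _) => none
  | (some _, some j, _) => some j
  | (some _, none, some b) => some b.2
  | (some _, none, none) => none

-- ===== PRECONDITION & SPEC =====
-- Pre_ excludes exactly the inputs where Python raises IndexError: an index i with
-- vid_ids[i] == current_vid but i out of range for window_ids.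
def Pre_get_next_window_index (vid_ids : List Int) (window_ids : List Int) (current_vid : Int) (current_window : Int) : Prop :=
  ∀ p ∈ PySem.List.enumerate vid_ids, p.2 = current_vid → p.1 < (window_ids.length : Int)
instance (vid_ids : List Int) (window_ids : List Int) (current_vid : Int) (current_window : Int) : Decidable (Pre_get_next_window_index vid_ids window_ids current_vid current_window) := by unfold Pre_get_next_window_index; infer_instance

def pvWitness_get_next_window_index : List Int × List Int × Int × Int := ([1, 1, 2], [0, 1, 0], 1, 0)

def Spec_get_next_window_index (vid_ids : List Int) (window_ids : List Int) (current_vid : Int) (current_window : Int) (out : Option Int) : Prop := out = get_next_window_index_alt vid_ids window_ids current_vid current_window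
instance (vid_ids : List Int) (window_ids : List Int) (current_vid : Int) (current_window : Int) (out : Option Int) : Decidable (Spec_get_next_window_index vid_ids window_ids current_vid current_window out) := by unfold Spec_get_next_window_index; infer_instance

-- ===== CLAIM (what is proved, stated in full; the proofs are below) =====
def Claim_equal_get_next_window_index : Prop := ∀ (vid_ids : List Int) (window_ids : List Int) (current_vid : Int) (current_window : Int), Dom_get_next_window_index vid_ids window_ids current_vid current_window → Pre_get_next_window_index vid_ids window_ids current_vid current_window → Spec_get_next_window_index vid_ids window_ids current_vid current_window (get_next_window_index vid_ids window_ids current_vid current_window)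

-- ===== LEMMAS AND PROOFS =====

-- strict lexicographic order on pairs, as Python compares tuples
def lexLt (a b : Int × Int) : Prop := a.1 < b.1 ∨ (a.1 = b.1 ∧ a.2 < b.2)

-- the common stream both programs process: (window, index) for each index of current_vid
def pvS (vid_ids window_ids : List Int) (cv : Int) : List (Int × Int) :=
  (PySem.List.enumerate vid_ids).filterMap
    (fun p => if p.2 = cv then some (PySem.List.pyGetD window_ids p.1 0, p.1) else none)

-- A's scan of the sorted list, recursively
def findNext (cw : Int) : List (Int × Int) → Option Int
  | [] => none
  | a :: t => if a.1 = cw then t.head?.map (fun p => p.2) else findNext cw t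

-- B's state update restricted to the matching pairs, split by component
def pairStepEq (fs : Option Int × Option Int) (q : Int × Int) : Option Int × Option Int :=
  match fs with
  | (none, s) => (some q.2, s)
  | (some f, none) => (some f, some q.2)
  | _ => fs

def pairStepMin (b : Option (Int × Int)) (q : Int × Int) : Option (Int × Int) :=
  match b with
  | none => some q
  | some b0 => if q.1 < b0.1 ∨ (q.1 = b0.1 ∧ q.2 < b0.2) then some q else some b0

def pairStep (cw : Int) (st : Option Int × Option Int × Option (Int × Int)) (q : Int × Int) :
    Option Int × Option Int × Option (Int × Int) :=
  if q.1 = cw then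
    let fs := pairStepEq (st.1, st.2.1) q
    (fs.1, fs.2, st.2.2)
  else if cw < q.1 then (st.1, st.2.1, pairStepMin st.2.2 q)
  else st

theorem lexLt_irrefl (a : Int × Int) : ¬ lexLt a a := by unfold lexLt; omega

theorem lexLt_asymm {a b : Int × Int} (h : lexLt a b) : ¬ lexLt b a := by unfold lexLt at *; omega

theorem lexLt_trans {a b c : Int × Int} (h1 : lexLt a b) (h2 : lexLt b c) : lexLt a c := by
  unfold lexLt at *; omega

theorem lexLt_antisymm_eq {a b : Int × Int} (h1 : ¬ lexLt a b) (h2 : ¬ lexLt b a) : a = b := by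
  unfold lexLt at *
  have : a.1 = b.1 ∧ a.2 = b.2 := by omega
  exact Prod.ext this.1 this.2

-- fuse B's loop over enumerate into a loop over pvS
theorem foldl_altStep_fuse (w : List Int) (cv cw : Int) :
    ∀ (l : List (Int × Int)) (st : Option Int × Option Int × Option (Int × Int)),
    l.foldl (altStep w cv cw) st
      = (l.filterMap (fun p => if p.2 = cv then some (PySem.List.pyGetD w p.1 0, p.1) else none)).foldl
          (pairStep cw) st := by
  intro l
  induction l with
  | nil => intro st; rfl
  | cons p t ih =>
    intro st
    by_cases hp : p.2 = cv
    · have hstep : altStep w cv cw st p = pairStep cw st (PySem.List.pyGetD w p.1 0, p.1) := by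
        rcases st with ⟨f, s, b⟩
        cases f <;> cases s <;> cases b <;>
          simp [altStep, pairStep, pairStepEq, pairStepMin, hp] <;> split_ifs <;> simp_all
      simp [hp, List.foldl_cons, hstep, ih]
    · simp [hp, List.foldl_cons, altStep, ih]

theorem B_char (v w : List Int) (cv cw : Int) :
    get_next_window_index_alt v w cv cw
      = match (pvS v w cv).foldl (pairStep cw) (none, none, none) with
        | (none, _, _) => none
        | (some _, some j, _) => some j
        | (some _, none, some b) => some b.2
        | (some _, none, none) => none := by
  unfold get_next_window_index_alt pvS
  rw [foldl_altStep_fuse]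

-- split the fused fold into the two independent folds
theorem foldl_pairStep_split (cw : Int) :
    ∀ (T : List (Int × Int)) (f s : Option Int) (b : Option (Int × Int)),
    T.foldl (pairStep cw) (f, s, b)
      = (((T.filter (fun q => decide (q.1 = cw))).foldl pairStepEq (f, s)).1,
         ((T.filter (fun q => decide (q.1 = cw))).foldl pairStepEq (f, s)).2,
         (T.filter (fun q => decide (cw < q.1))).foldl pairStepMin b) := by
  intro T
  induction T with
  | nil => intro f s b; rfl
  | cons q t ih =>
    intro f s b
    by_cases h1 : q.1 = cw
    · have h2 : ¬ cw < q.1 := by omega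
      simp only [List.foldl_cons, List.filter_cons, pairStep, h1, lt_self_iff_false,
        decide_true, decide_false, if_true, if_false, Bool.false_eq_true]
      exact ih _ _ _
    · by_cases h2 : cw < q.1
      · simp only [List.foldl_cons, List.filter_cons, pairStep, h1, h2, decide_true,
          decide_false, if_true, if_false, Bool.false_eq_true]
        exact ih _ _ _
      · simp only [List.foldl_cons, List.filter_cons, pairStep, h1, h2, decide_false,
          if_false, Bool.false_eq_true]
        exact ih _ _ _

theorem foldl_pairStepEq_full (E : List (Int × Int)) (x y : Int) :
    E.foldl pairStepEq (some x, some y) = (some x, some y) := by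
  induction E with
  | nil => rfl
  | cons e t ih => simpa [pairStepEq] using ih

theorem foldl_pairStepMin_spec (G : List (Int × Int)) :
    ∀ (b0 : Int × Int), ∃ m, G.foldl pairStepMin (some b0) = some m ∧ m ∈ b0 :: G ∧
      ∀ x ∈ b0 :: G, ¬ lexLt x m := by
  induction G with
  | nil =>
    intro b0
    refine ⟨b0, rfl, by simp, ?_⟩
    intro x hx
    rw [List.mem_singleton] at hx
    subst hx
    exact lexLt_irrefl x
  | cons q t ih =>
    intro b0
    by_cases h : q.1 < b0.1 ∨ (q.1 = b0.1 ∧ q.2 < b0.2)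
    · obtain ⟨m, hm, hmem, hmin⟩ := ih q
      refine ⟨m, ?_, ?_, ?_⟩
      · rw [List.foldl_cons]; simpa [pairStepMin, h] using hm
      · rcases List.mem_cons.mp hmem with rfl | h1
        · exact List.mem_cons_of_mem _ (List.mem_cons_self ..)
        · exact List.mem_cons_of_mem _ (List.mem_cons_of_mem _ h1)
      · intro x hx
        rcases List.mem_cons.mp hx with rfl | hx
        · intro hlt
          exact hmin q (List.mem_cons_self ..) (lexLt_trans h hlt)
        · exact hmin x hx
    · obtain ⟨m, hm, hmem, hmin⟩ := ih b0
      refine ⟨m, ?_, ?_, ?_⟩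
      · rw [List.foldl_cons]; simpa [pairStepMin, h] using hm
      · rcases List.mem_cons.mp hmem with rfl | h1
        · exact List.mem_cons_self ..
        · exact List.mem_cons_of_mem _ (List.mem_cons_of_mem _ h1)
      · intro x hx
        rcases List.mem_cons.mp hx with rfl | hx
        · exact hmin x (List.mem_cons_self ..)
        · rcases List.mem_cons.mp hx with rfl | hx
          · intro hlt
            have hqb : ¬ lexLt x b0 := h
            have hbm : ¬ lexLt b0 m := hmin b0 (List.mem_cons_self ..)
            unfold lexLt at hqb hbm hlt
            omega
          · exact hmin x (List.mem_cons_of_mem _ hx)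

theorem foldl_pairStepMin_none (G : List (Int × Int)) :
    (G.foldl pairStepMin none = none ∧ G = []) ∨
      ∃ m, G.foldl pairStepMin none = some m ∧ m ∈ G ∧ ∀ x ∈ G, ¬ lexLt x m := by
  cases G with
  | nil => exact Or.inl ⟨rfl, rfl⟩
  | cons q t =>
    obtain ⟨m, hm, hmem, hmin⟩ := foldl_pairStepMin_spec t q
    exact Or.inr ⟨m, by simpa [pairStepMin] using hm, hmem, hmin⟩

-- A-side: the position scan is findIdx?
theorem posList_head (cw : Int) :
    ∀ (L : List (Int × Int)) (s : Int),
    ((PySem.List.enumerate L s).filterMap (fun q => if q.2.1 = cw then some q.1 else none)).head?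
      = (L.findIdx? (fun p => decide (p.1 = cw))).map (fun k : Nat => s + (k : Int)) := by
  intro L
  induction L with
  | nil => intro s; simp [PySem.List.enumerate]
  | cons a t ih =>
    intro s
    rw [PySem.List.enumerate_cons]
    by_cases h : a.1 = cw
    · simp [h, List.findIdx?_cons]
    · simp only [List.filterMap_cons, List.findIdx?_cons, h, if_false, decide_false]
      rw [ih (s + 1)]
      cases t.findIdx? (fun p => decide (p.1 = cw)) <;> simp
      omega

theorem findNext_eq_findIdx (cw : Int) :
    ∀ (L : List (Int × Int)),
    findNext cw L
      = match L.findIdx? (fun p => decide (p.1 = cw)) with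
        | none => none
        | some k => (L[k+1]?).map (fun p => p.2) := by
  intro L
  induction L with
  | nil => rfl
  | cons a t ih =>
    by_cases h : a.1 = cw
    · simp [findNext, h, List.findIdx?_cons, List.head?_eq_getElem?]
    · simp only [findNext, List.findIdx?_cons, h, if_false, decide_false]
      rw [ih]
      cases t.findIdx? (fun p => decide (p.1 = cw)) <;> simp

theorem A_char (v w : List Int) (cv cw : Int) :
    get_next_window_index v w cv cw
      = findNext cw (PySem.List.sorted2 (pvS v w cv) (fun p => p.1) (fun p => p.2)) := by
  simp only [get_next_window_index]
  have hS : (((PySem.List.enumerate v).filterMap (fun p => if p.2 = cv then some p.1 else none)).map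
      (fun i => (PySem.List.pyGetD w i 0, i))) = pvS v w cv := by
    rw [List.map_filterMap]
    unfold pvS
    congr 1
    funext p
    by_cases h : p.2 = cv <;> simp [h]
  rw [hS]
  set L := PySem.List.sorted2 (pvS v w cv) (fun p => p.1) (fun p => p.2) with hL
  rw [findNext_eq_findIdx]
  have hhead := posList_head cw L 0
  cases hfi : L.findIdx? (fun p => decide (p.1 = cw)) with
  | none =>
    rw [hfi, Option.map_none] at hhead
    rw [List.head?_eq_none_iff] at hhead
    rw [hhead]
  | some k =>
    rw [hfi, Option.map_some] at hhead
    cases hpl : ((PySem.List.enumerate L 0).filterMap (fun q => if q.2.1 = cw then some q.1 else none)) with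
    | nil => rw [hpl, List.head?_nil] at hhead; exact absurd hhead (by simp)
    | cons pos rest =>
      rw [hpl, List.head?_cons] at hhead
      have hp : pos = (k : Int) := by
        have := Option.some.inj hhead
        omega
      subst hp
      show (if (k : Int) + 1 < (L.length : Int) then (PySem.List.pyGet? L ((k : Int) + 1)).map (fun p => p.2) else none)
            = (L[k+1]?).map (fun p => p.2)
      by_cases hlt : k + 1 < L.length
      · have hlt' : (k : Int) + 1 < (L.length : Int) := by exact_mod_cast hlt
        rw [if_pos hlt']
        have hcast : (k : Int) + 1 = ((k + 1 : Nat) : Int) := by push_cast; ring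
        rw [hcast, PySem.List.pyGet?_natCast]
      · have hlt' : ¬ ((k : Int) + 1 < (L.length : Int)) := by
          intro hc
          exact hlt (by exact_mod_cast hc)
        rw [if_neg hlt']
        have hnone : L[k+1]? = none := by
          rw [List.getElem?_eq_none_iff]
          omega
        rw [hnone]
        rfl

-- the sorted list is strictly lexicographically increasing (its elements have distinct indices)
theorem pvS_pairwise_snd (v w : List Int) (cv : Int) :
    (pvS v w cv).Pairwise (fun a b => a.2 < b.2) := by
  unfold pvS
  have h := PySem.List.pairwise_lt_enumerate v 0
  rw [List.pairwise_filterMap]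
  refine h.imp ?_
  intro p q hpq x hx y hy
  by_cases hp : p.2 = cv <;> by_cases hq : q.2 = cv <;> simp [hp, hq] at hx hy
  subst hx; subst hy; simpa using hpq

theorem sorted2_eq_sorted_toLex (xs : List (Int × Int)) :
    PySem.List.sorted2 xs (fun p => p.1) (fun p => p.2)
      = PySem.List.sorted xs (fun p => (toLex p : Lex (Int × Int))) := by
  rw [PySem.List.sorted_eq_foldl_insertBy]
  simp only [PySem.List.sorted2]
  congr 1
  funext acc x
  congr 1
  funext a b
  have hiff : ((toLex a : Lex (Int × Int)) < toLex b) ↔ (a.1 < b.1 ∨ (a.1 = b.1 ∧ a.2 < b.2)) := Prod.Lex.lt_iff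
  rw [decide_eq_decide.mpr hiff]
  · by_cases h1 : a.1 < b.1 <;> by_cases h2 : b.1 < a.1 <;> by_cases h3 : a.2 < b.2 <;>
      simp [h1, h2, h3] <;> omega
  · infer_instance

theorem sorted2_pairwise_lexLt (v w : List Int) (cv : Int) :
    (PySem.List.sorted2 (pvS v w cv) (fun p => p.1) (fun p => p.2)).Pairwise lexLt := by
  rw [sorted2_eq_sorted_toLex]
  have hle := PySem.List.sorted_pairwise (pvS v w cv) (fun p => (toLex p : Lex (Int × Int)))
  have hperm := PySem.List.sorted_perm (pvS v w cv) (fun p => (toLex p : Lex (Int × Int))) false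
  have hnodupS : (pvS v w cv).Nodup :=
    (pvS_pairwise_snd v w cv).imp (fun h he => by subst he; exact lt_irrefl _ h)
  have hnodupL : (PySem.List.sorted (pvS v w cv) (fun p => (toLex p : Lex (Int × Int)))).Nodup :=
    hperm.symm.nodup hnodupS
  refine (hle.and hnodupL).imp ?_
  intro a b hab
  have hlt : (toLex a : Lex (Int × Int)) < toLex b :=
    lt_of_le_of_ne hab.1 (fun he => hab.2 (by simpa using he))
  rw [Prod.Lex.lt_iff] at hlt
  exact hlt

theorem sorted2_filter_eq (v w : List Int) (cv cw : Int) :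
    (PySem.List.sorted2 (pvS v w cv) (fun p => p.1) (fun p => p.2)).filter (fun q => decide (q.1 = cw))
      = (pvS v w cv).filter (fun q => decide (q.1 = cw)) := by
  have hperm : ((PySem.List.sorted2 (pvS v w cv) (fun p => p.1) (fun p => p.2)).filter
      (fun q => decide (q.1 = cw))).Perm ((pvS v w cv).filter (fun q => decide (q.1 = cw))) :=
    (PySem.List.sorted2_perm (pvS v w cv) (fun p => p.1) (fun p => p.2) false).filter _
  have hL : ((PySem.List.sorted2 (pvS v w cv) (fun p => p.1) (fun p => p.2)).filter
      (fun q => decide (q.1 = cw))).Pairwise (fun a b => a.2 < b.2) := by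
    refine ((sorted2_pairwise_lexLt v w cv).filter _).imp_of_mem ?_
    intro a b ha hb hab
    have ha1 : a.1 = cw := by simpa using (List.mem_filter.mp ha).2
    have hb1 : b.1 = cw := by simpa using (List.mem_filter.mp hb).2
    unfold lexLt at hab
    omega
  have hS : ((pvS v w cv).filter (fun q => decide (q.1 = cw))).Pairwise (fun a b => a.2 < b.2) :=
    (pvS_pairwise_snd v w cv).filter _
  exact List.Perm.eq_of_pairwise (fun a b _ _ h1 h2 => absurd h2 (by omega)) hL hS hperm

-- A's scan of a strictly sorted list, in terms of its filters
theorem findNext_sorted (cw : Int) :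
    ∀ (L : List (Int × Int)), L.Pairwise lexLt →
    findNext cw L
      = match L.filter (fun p => decide (p.1 = cw)) with
        | [] => none
        | [_] => ((L.filter (fun p => decide (cw < p.1))).head?).map (fun p => p.2)
        | _ :: m2 :: _ => some m2.2 := by
  intro L
  induction L with
  | nil => intro _; rfl
  | cons a t ih =>
    intro hp
    rw [List.pairwise_cons] at hp
    obtain ⟨ha, ht⟩ := hp
    by_cases h : a.1 = cw
    · simp only [findNext]
      rw [if_pos h]
      rw [List.filter_cons_of_pos (by simpa using h)]
      cases hft : t.filter (fun p => decide (p.1 = cw)) with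
      | nil =>
        rw [List.filter_cons_of_neg (by simp [h])]
        have hall : ∀ x ∈ t, cw < x.1 := by
          intro x hx
          have hax := ha x hx
          have hnx : ¬ x.1 = cw := by
            intro hc
            have hmem : x ∈ t.filter (fun p => decide (p.1 = cw)) :=
              List.mem_filter.mpr ⟨hx, by simp [hc]⟩
            rw [hft] at hmem
            simp at hmem
          unfold lexLt at hax
          omega
        rw [List.filter_eq_self.mpr (fun x hx => by simpa using hall x hx)]
      | cons m2 r =>
        have hm2f : m2 ∈ t.filter (fun p => decide (p.1 = cw)) := by
          rw [hft]; exact List.mem_cons_self ..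
        have hm2 : m2 ∈ t := (List.mem_filter.mp hm2f).1
        have hm2cw : m2.1 = cw := by simpa using (List.mem_filter.mp hm2f).2
        cases t with
        | nil => simp at hm2
        | cons b r2 =>
          by_cases hb : b.1 = cw
          · rw [List.filter_cons_of_pos (by simpa using hb)] at hft
            have hbm2 : b = m2 := (List.cons_eq_cons.mp hft).1
            simp [hbm2]
          · exfalso
            have hab := ha b (List.mem_cons_self ..)
            have hbgt : cw < b.1 := by unfold lexLt at hab; omega
            rcases List.mem_cons.mp hm2 with rfl | hm2r
            · exact hb hm2cw
            · have hbm2 := (List.pairwise_cons.mp ht).1 m2 hm2r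
              unfold lexLt at hbm2
              omega
    · simp only [findNext]
      rw [if_neg h]
      rw [ih ht]
      rw [List.filter_cons_of_neg (by simp [h])]
      cases hft : t.filter (fun p => decide (p.1 = cw)) with
      | nil => rfl
      | cons m r =>
        cases r with
        | nil =>
          have hmf : m ∈ t.filter (fun p => decide (p.1 = cw)) := by
            rw [hft]; exact List.mem_cons_self ..
          have hm : m ∈ t := (List.mem_filter.mp hmf).1
          have hmcw : m.1 = cw := by simpa using (List.mem_filter.mp hmf).2
          have hagt : ¬ cw < a.1 := by
            intro hgt
            have ham := ha m hm
            unfold lexLt at ham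
            omega
          rw [List.filter_cons_of_neg (by simpa using hagt)]
        | cons m2 r2 => rfl

theorem main_equiv (v w : List Int) (cv cw : Int) :
    get_next_window_index v w cv cw = get_next_window_index_alt v w cv cw := by
  rw [A_char, B_char]
  rw [findNext_sorted cw _ (sorted2_pairwise_lexLt v w cv)]
  rw [foldl_pairStep_split]
  rw [sorted2_filter_eq]
  have hpermG : ((PySem.List.sorted2 (pvS v w cv) (fun p => p.1) (fun p => p.2)).filter
      (fun q => decide (cw < q.1))).Perm ((pvS v w cv).filter (fun q => decide (cw < q.1))) :=
    (PySem.List.sorted2_perm (pvS v w cv) (fun p => p.1) (fun p => p.2) false).filter _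
  cases hE : (pvS v w cv).filter (fun q => decide (q.1 = cw)) with
  | nil => rfl
  | cons m E' =>
    cases E' with
    | cons m2 E'' =>
      -- at least two matching windows: both return the second one
      rw [show (m :: m2 :: E'').foldl pairStepEq (none, none) = (some m.2, some m2.2) by
        simp [pairStepEq, foldl_pairStepEq_full]]
    | nil =>
      -- exactly one matching window: both return the least greater (window, index)
      rw [show [m].foldl pairStepEq (none, none) = (some m.2, none) by simp [pairStepEq]]
      rcases foldl_pairStepMin_none ((pvS v w cv).filter (fun q => decide (cw < q.1))) with
        ⟨hfold, hGS⟩ | ⟨mm, hfold, hmem, hmin⟩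
      · rw [hfold]
        rw [hGS] at hpermG
        rw [List.Perm.eq_nil hpermG]
        rfl
      · rw [hfold]
        have hmemL : mm ∈ (PySem.List.sorted2 (pvS v w cv) (fun p => p.1) (fun p => p.2)).filter
            (fun q => decide (cw < q.1)) := hpermG.mem_iff.mpr hmem
        cases hGL : (PySem.List.sorted2 (pvS v w cv) (fun p => p.1) (fun p => p.2)).filter
            (fun q => decide (cw < q.1)) with
        | nil => rw [hGL] at hmemL; simp at hmemL
        | cons hd tl =>
          have hpairGL : (hd :: tl).Pairwise lexLt := by
            rw [← hGL]
            exact (sorted2_pairwise_lexLt v w cv).filter _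
          have hdmin : ∀ x ∈ hd :: tl, ¬ lexLt x hd := by
            intro x hx
            rcases List.mem_cons.mp hx with rfl | hx
            · exact lexLt_irrefl x
            · exact lexLt_asymm ((List.pairwise_cons.mp hpairGL).1 x hx)
          have hhdS : hd ∈ (pvS v w cv).filter (fun q => decide (cw < q.1)) := by
            refine hpermG.mem_iff.mp ?_
            rw [hGL]
            exact List.mem_cons_self ..
          have heq : mm = hd := by
            refine lexLt_antisymm_eq ?_ ?_
            · rw [hGL] at hmemL
              exact hdmin mm hmemL
            · exact hmin hd hhdS
          rw [heq]
          rfl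

-- ===== VERDICT (by name: the statement is the Claim_ definition above) =====
theorem get_next_window_index_spec : Claim_equal_get_next_window_index := by
  intro v w cv cw _ _
  unfold Spec_get_next_window_index
  exact main_equiv v w cv cw
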